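-- pv_equiv track=rewrite | github.com/jongpark1234/Baekjoon | 17000/baekjoon_17613.py | dnc
-- ===== SOURCE A (Python) =====
-- def dnc(x, y):
--     if y < 2:
--         return y
--     n = 30
--     while y < (1 << n) - 1:
--         n -= 1
--     line = (1 << n) - 1
--     if x > line - 1:
--         return dnc(x - line, y - line) + n
--     else:
--         w = n
--         for i in range(max(0, n - line + x - 1), n - 1)[::-1]:
--             w += i
--         return max(dnc(0, y - line) + n, w)
-- ===== SOURCE B (Python) =====
-- def dnc(x, y):
--     acc = 0
--     # phase 1: peel whole blocks while x covers the full line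
--     while y >= 2:
--         n = 30
--         while y < (1 << n) - 1:
--             n -= 1
--         line = (1 << n) - 1
--         if x >= line:
--             acc += n
--             x -= line
--             y -= line
--         else:
--             break
--     if y < 2:
--         return acc + y
--     # first time x does not cover the line: one candidate from the partial row
--     best = acc + n + sum(range(max(0, n - line + x - 1), n - 1))
--     # remaining chain has x = 0: running maximum over level sums
--     y -= line
--     acc += n
--     while y >= 2:
--         n = 30
--         while y < (1 << n) - 1:
--             n -= 1
--         line = (1 << n) - 1
--         w0 = acc + n + (n - 1) * (n - 2) // 2
--         if w0 > best:
--             best = w0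
--         acc += n
--         y -= line
--     if acc + y > best:
--         best = acc + y
--     return best
-- ===== Notes on version B (the rewrite author's own statement) =====
-- stated objective: alternative
-- what changed: Replaces A's double recursion (one recursive call per peeled block plus a nested recursive chain under max) by a single iterative pass: a loop that accumulates peeled block heights, then one candidate from the partial row, then a second loop maintaining a running maximum over the x=0 chain with a closed-form row sum (n-1)(n-2)//2 instead of the inner range loop.
import Mathlib
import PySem

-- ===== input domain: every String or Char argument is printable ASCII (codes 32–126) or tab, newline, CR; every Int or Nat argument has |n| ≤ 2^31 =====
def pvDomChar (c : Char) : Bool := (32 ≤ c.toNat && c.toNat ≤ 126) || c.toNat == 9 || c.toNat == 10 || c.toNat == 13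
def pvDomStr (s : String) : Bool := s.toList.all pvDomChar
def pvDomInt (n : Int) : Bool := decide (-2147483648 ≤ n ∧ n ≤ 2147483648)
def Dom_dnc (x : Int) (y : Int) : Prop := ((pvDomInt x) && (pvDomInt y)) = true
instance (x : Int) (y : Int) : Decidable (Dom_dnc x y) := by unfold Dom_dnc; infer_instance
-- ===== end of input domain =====

-- B replaces the double recursion of A by one iterative pass with an accumulator and a
-- running maximum (objective: alternative decomposition, same asymptotic cost).

-- ===== PORT A =====

-- `n = 30; while y < (1 << n) - 1: n -= 1`  (fuel = the initial n; for y ≥ 2 the loop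
-- always stops at n ≥ 1, so the fuel form is exact on all reachable inputs)
def findN (y : Int) : Nat → Nat
  | 0 => 0
  | n + 1 => if y < 2 ^ (n + 1) - 1 then findN y n else n + 1

-- the while loop stops no later than n = 1 when 1 ≤ y (used for termination of the ports)
theorem findN_pos (y : Int) (hy : 1 ≤ y) : ∀ k : Nat, 1 ≤ findN y (k + 1) := by
  intro k
  induction k with
  | zero =>
    simp only [findN]
    split <;> omega
  | succ k ih =>
    simp only [findN]
    split
    · exact ih
    · omega

theorem two_le_pow_findN (y : Int) (hy : 1 ≤ y) : (2 : Int) ≤ 2 ^ (findN y 30) := by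
  have h1 : 1 ≤ findN y 30 := findN_pos y hy 29
  calc (2 : Int) = 2 ^ 1 := by norm_num
    _ ≤ 2 ^ (findN y 30) := by exact pow_le_pow_right₀ (by norm_num) h1

-- literal port of A; `range(a,b)[::-1]` is ported as `(pyRange a b 1).reverse` (exact)
def dnc (x : Int) (y : Int) : Int :=
  if _h : y < 2 then y
  else
    let n := findN y 30
    let line : Int := 2 ^ n - 1
    if x > line - 1 then dnc (x - line) (y - line) + n
    else
      let w := ((PySem.List.pyRange (max 0 ((n : Int) - line + x - 1)) ((n : Int) - 1) 1).reverse).foldl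
        (fun w i => w + i) (n : Int)
      max (dnc 0 (y - line) + n) w
termination_by y.toNat
decreasing_by
  · have h2 := two_le_pow_findN y (by omega)
    omega
  · have h2 := two_le_pow_findN y (by omega)
    omega

-- ===== PORT B =====

-- the second while loop of Source B (the x = 0 chain), as a recursion over the same state
def chain (y : Int) (acc : Int) (best : Int) : Int :=
  if _h : y < 2 then (if acc + y > best then acc + y else best)
  else
    let n := findN y 30
    let line : Int := 2 ^ n - 1
    let w0 := acc + (n : Int) + PySem.Int.floordiv (((n : Int) - 1) * ((n : Int) - 2)) 2
    chain (y - line) (acc + (n : Int)) (if w0 > best then w0 else best)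
termination_by y.toNat
decreasing_by
  have h2 := two_le_pow_findN y (by omega)
  omega

-- the first while loop of Source B (peeling full blocks), with `break` + first candidate;
-- `sum(range(a,b))` is ported as `(pyRange a b 1).sum`
def phase1 (x : Int) (y : Int) (acc : Int) : Int :=
  if _h : y < 2 then acc + y
  else
    let n := findN y 30
    let line : Int := 2 ^ n - 1
    if x ≥ line then phase1 (x - line) (y - line) (acc + (n : Int))
    else
      let best := acc + (n : Int) + (PySem.List.pyRange (max 0 ((n : Int) - line + x - 1)) ((n : Int) - 1) 1).sum
      chain (y - line) (acc + (n : Int)) best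
termination_by y.toNat
decreasing_by
  have h2 := two_le_pow_findN y (by omega)
  omega

def dnc_alt (x : Int) (y : Int) : Int := phase1 x y 0

-- ===== PRECONDITION & SPEC =====
def Spec_dnc (x : Int) (y : Int) (out : Int) : Prop := out = dnc_alt x y
instance (x : Int) (y : Int) (out : Int) : Decidable (Spec_dnc x y out) := by unfold Spec_dnc; infer_instance

-- ===== CLAIM (what is proved, stated in full; the proofs are below) =====
def Claim_equal_dnc : Prop := ∀ (x : Int) (y : Int), Dom_dnc x y → Spec_dnc x y (dnc x y)

-- ===== LEMMAS AND PROOFS =====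

theorem foldl_add_self (l : List Int) (c : Int) :
    l.foldl (fun w i => w + i) c = c + l.sum := by
  induction l generalizing c with
  | nil => simp
  | cons a l ih => simp [List.foldl_cons, ih, List.sum_cons]; ring

theorem sum_pyRange_two (m : Nat) :
    2 * (PySem.List.pyRange 0 (m : Int) 1).sum = (m : Int) * ((m : Int) - 1) := by
  induction m with
  | zero => simp [PySem.List.pyRange_one_eq_nil]
  | succ m ih =>
    have h : ((m + 1 : Nat) : Int) = (m : Int) + 1 := by push_cast; ring
    rw [h, PySem.List.pyRange_one_succ_right (by positivity)]
    simp only [List.sum_append, List.sum_cons, List.sum_nil]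
    linear_combination ih

theorem w0_eq (n : Nat) (hn : 1 ≤ n) :
    PySem.Int.floordiv (((n : Int) - 1) * ((n : Int) - 2)) 2 =
      (PySem.List.pyRange 0 ((n : Int) - 1) 1).sum := by
  obtain ⟨m, rfl⟩ : ∃ m, n = m + 1 := ⟨n - 1, by omega⟩
  have h1 : ((m + 1 : Nat) : Int) - 1 = (m : Int) := by push_cast; ring
  have h2 : ((m + 1 : Nat) : Int) - 2 = (m : Int) - 1 := by push_cast; ring
  rw [h1, h2, PySem.Int.floordiv_eq_ediv_of_pos (by norm_num), ← sum_pyRange_two m,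
    Int.mul_ediv_cancel_left _ (by norm_num)]

theorem nat_le_two_pow (n : Nat) : (n : Int) ≤ 2 ^ n := by
  have := Nat.lt_two_pow_self (n := n)
  exact_mod_cast this.le

theorem chain_eq (y acc best : Int) : chain y acc best = max best (acc + dnc 0 y) := by
  by_cases hy : y < 2
  · rw [chain, dnc]
    simp only [dif_pos hy]
    omega
  · rw [chain, dnc]
    simp only [dif_neg hy]
    set n := findN y 30 with hn
    have hn1 : 1 ≤ n := findN_pos y (by omega) 29
    have hnp := nat_le_two_pow n
    have h2 : (2 : Int) ≤ 2 ^ n := by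
      calc (2 : Int) = 2 ^ 1 := by norm_num
        _ ≤ 2 ^ n := by exact pow_le_pow_right₀ (by norm_num) hn1
    -- the A side takes the else branch: 0 > line - 1 is false
    rw [if_neg (by omega : ¬ (0 : Int) > (2 ^ n - 1) - 1)]
    -- A's lower bound max 0 (n - line + 0 - 1) is 0
    have hlo : max 0 ((n : Int) - (2 ^ n - 1) + 0 - 1) = 0 := by omega
    rw [hlo, foldl_add_self, List.sum_reverse, w0_eq n hn1,
      chain_eq (y - (2 ^ n - 1)) (acc + (n : Int))]
    omega
termination_by y.toNat
decreasing_by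
  have h2 := two_le_pow_findN y (by omega)
  omega

theorem phase1_eq (x y acc : Int) : phase1 x y acc = acc + dnc x y := by
  by_cases hy : y < 2
  · rw [phase1, dnc]
    simp only [dif_pos hy]
  · rw [phase1, dnc]
    simp only [dif_neg hy]
    set n := findN y 30 with hn
    have hn1 : 1 ≤ n := findN_pos y (by omega) 29
    have h2 : (2 : Int) ≤ 2 ^ n := by
      calc (2 : Int) = 2 ^ 1 := by norm_num
        _ ≤ 2 ^ n := by exact pow_le_pow_right₀ (by norm_num) hn1
    by_cases hx : x ≥ (2 ^ n - 1 : Int)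
    · rw [if_pos hx, if_pos (by omega : x > (2 ^ n - 1 : Int) - 1),
        phase1_eq (x - (2 ^ n - 1)) (y - (2 ^ n - 1)) (acc + (n : Int))]
      ring
    · rw [if_neg hx, if_neg (by omega : ¬ x > (2 ^ n - 1 : Int) - 1),
        chain_eq (y - (2 ^ n - 1)) (acc + (n : Int)), foldl_add_self, List.sum_reverse]
      omega
termination_by y.toNat
decreasing_by
  have h2 := two_le_pow_findN y (by omega)
  omega

-- ===== VERDICT (by name: the statement is the Claim_ definition above) =====
theorem dnc_spec : Claim_equal_dnc := by
  intro x y _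
  unfold Spec_dnc dnc_alt
  rw [phase1_eq]
  ring
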